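-- pv_equiv track=rewrite | github.com/jozefgocik/algoexpert | medium/sweetAndSavory.py | sweetAndSavory
-- ===== SOURCE A (Python) =====
-- def sweetAndSavory(dishes, target):
--     # O(nLog(n)) time / O(n) space
--     sweets = sorted([dish for dish in dishes if dish < 0], key=abs)
--     savories = sorted([dish for dish in dishes if dish > 0])
--
--     sweet = 0
--     savory = 0
--     difference = float("inf")
--     sweetIndex = 0
--     savoryIndex = 0
--
--     while sweetIndex < len(sweets) and savoryIndex < len(savories):
--         currentSum = sweets[sweetIndex] + savories[savoryIndex]
--
--         if currentSum <= target:
--             currentDifference = target - currentSum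
--             if currentDifference < difference:
--                 difference = currentDifference
--                 sweet = sweets[sweetIndex]
--                 savory = savories[savoryIndex]
--             savoryIndex += 1
--         else:
--             sweetIndex += 1
--
--     return [sweet, savory]
-- ===== SOURCE B (Python) =====
-- def sweetAndSavory(dishes, target):
--     # Plain nested best-pair scan over the sorted sweet/savory lists.
--     sweets = sorted([d for d in dishes if d < 0], key=abs)
--     savories = sorted([d for d in dishes if d > 0])
--     best = None  # (difference, sweet, savory)
--     for sweet in sweets:
--         for savory in savories:
--             s = sweet + savory
--             if s <= target and (best is None or target - s < best[0]):
--                 best = (target - s, sweet, savory)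
--     return [best[1], best[2]] if best is not None else [0, 0]
-- ===== Notes on version B (the rewrite author's own statement) =====
-- stated objective: simpler
-- what changed: A's interleaved two-pointer sweep over the two sorted lists (with its sweet/savory/difference index bookkeeping) is replaced by a plain nested loop over all sweet-savory pairs keeping the best (difference, sweet, savory) triple under a strict-< update.
import Mathlib
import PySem

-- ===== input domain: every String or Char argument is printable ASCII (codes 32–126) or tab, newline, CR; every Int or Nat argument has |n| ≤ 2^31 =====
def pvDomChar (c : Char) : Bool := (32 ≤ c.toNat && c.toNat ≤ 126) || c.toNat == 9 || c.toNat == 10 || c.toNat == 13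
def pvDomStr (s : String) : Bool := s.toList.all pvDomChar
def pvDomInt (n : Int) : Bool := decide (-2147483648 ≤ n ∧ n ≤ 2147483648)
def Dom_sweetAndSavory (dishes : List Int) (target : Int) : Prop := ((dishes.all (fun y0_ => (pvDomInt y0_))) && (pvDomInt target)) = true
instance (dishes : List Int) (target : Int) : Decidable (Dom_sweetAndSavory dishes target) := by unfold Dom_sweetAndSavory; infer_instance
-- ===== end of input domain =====

-- B replaces A's two-pointer sweep by a plain nested best-pair scan (same sorted lists,
-- strict-< update), trading the O(n) sweep for a simpler quadratic loop; return value only.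

-- ===== PORT A =====
-- 'difference' starts at float("inf"); ported as Option Int with none = +inf
def pvCmpInf (c : Int) (d : Option Int) : Bool :=
  match d with
  | none => true
  | some dd => decide (c < dd)

def pvLoopA (sweets savories : List Int) (target : Int)
    (si sj : Nat) (sweet savory : Int) (difference : Option Int) : List Int :=
  if h : si < sweets.length ∧ sj < savories.length then
    let currentSum := sweets.getD si 0 + savories.getD sj 0
    if currentSum ≤ target then
      if pvCmpInf (target - currentSum) difference then
        pvLoopA sweets savories target si (sj+1) (sweets.getD si 0) (savories.getD sj 0)
          (some (target - currentSum))
      else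
        pvLoopA sweets savories target si (sj+1) sweet savory difference
    else
      pvLoopA sweets savories target (si+1) sj sweet savory difference
  else
    [sweet, savory]
termination_by (sweets.length - si) + (savories.length - sj)
decreasing_by all_goals omega

def sweetAndSavory (dishes : List Int) (target : Int) : List Int :=
  pvLoopA (PySem.List.sorted (dishes.filter (fun d => d < 0)) (fun d => |d|) false)
          (PySem.List.sorted (dishes.filter (fun d => d > 0)) (fun d => d) false)
          target 0 0 0 0 none

-- ===== PORT B =====
-- inner-loop body of Source B: best is None | (difference, sweet, savory)
def pvStepB (target sweet : Int) (b : Option (Int × Int × Int)) (savory : Int) :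
    Option (Int × Int × Int) :=
  let s := sweet + savory
  if decide (s ≤ target) && (match b with
                             | none => true
                             | some (dd, _, _) => decide (target - s < dd)) then
    some (target - s, sweet, savory)
  else
    b

def sweetAndSavory_alt (dishes : List Int) (target : Int) : List Int :=
  let sweets := PySem.List.sorted (dishes.filter (fun d => d < 0)) (fun d => |d|) false
  let savories := PySem.List.sorted (dishes.filter (fun d => d > 0)) (fun d => d) false
  let best := sweets.foldl (fun b sweet => savories.foldl (pvStepB target sweet) b) none
  match best with
  | none => [0, 0]
  | some (_, s, v) => [s, v]

-- ===== PRECONDITION & SPEC =====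
def Spec_sweetAndSavory (dishes : List Int) (target : Int) (out : List Int) : Prop := out = sweetAndSavory_alt dishes target
instance (dishes : List Int) (target : Int) (out : List Int) : Decidable (Spec_sweetAndSavory dishes target out) := by unfold Spec_sweetAndSavory; infer_instance

-- ===== CLAIM (what is proved, stated in full; the proofs are below) =====
def Claim_equal_sweetAndSavory : Prop := ∀ (dishes : List Int) (target : Int), Dom_sweetAndSavory dishes target → Spec_sweetAndSavory dishes target (sweetAndSavory dishes target)

-- ===== LEMMAS AND PROOFS =====

-- B's step as a function of a (sweet, savory) pair
def pvPairStep (target : Int) (b : Option (Int × Int × Int)) (p : Int × Int) :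
    Option (Int × Int × Int) :=
  pvStepB target p.1 b p.2

-- the pairs the nested loop has not yet conceptually processed when A is at (si, sj)
def pvRest (sweets savories : List Int) (si sj : Nat) : List (Int × Int) :=
  match sweets.drop si with
  | [] => []
  | s :: rest =>
    ((savories.drop sj).map (fun v => (s, v))) ++
      rest.flatMap (fun s' => savories.map (fun v => (s', v)))

-- A's (sweet, savory, difference) state as B's option state
def pvAbs (sweet savory : Int) (d : Option Int) : Option (Int × Int × Int) :=
  match d with
  | none => none
  | some dd => some (dd, sweet, savory)

def pvOut (b : Option (Int × Int × Int)) : List Int :=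
  match b with
  | none => [0, 0]
  | some (_, s, v) => [s, v]

lemma pv_step_neutral (target : Int) (p : Int × Int) (b : Option (Int × Int × Int))
    (h : p.1 + p.2 ≤ target →
      ∃ dd s v, b = some (dd, s, v) ∧ dd ≤ target - (p.1 + p.2)) :
    pvPairStep target b p = b := by
  unfold pvPairStep pvStepB
  by_cases hq : p.1 + p.2 ≤ target
  · obtain ⟨dd, s, v, hb, hdd⟩ := h hq
    subst hb
    simp only [hq, decide_true, Bool.true_and]
    have : ¬ (target - (p.1 + p.2) < dd) := by omega
    simp [this]
  · simp [hq]

lemma pv_fold_neutral (target : Int) (l : List (Int × Int)) (b : Option (Int × Int × Int))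
    (h : ∀ p ∈ l, p.1 + p.2 ≤ target →
      ∃ dd s v, b = some (dd, s, v) ∧ dd ≤ target - (p.1 + p.2)) :
    l.foldl (pvPairStep target) b = b := by
  induction l with
  | nil => rfl
  | cons p l ih =>
    rw [List.foldl_cons, pv_step_neutral target p b (h p (by simp))]
    exact ih (fun q hq => h q (by simp [hq]))

lemma pv_pairwise_getD {R : Int → Int → Prop} (l : List Int) (h : l.Pairwise R)
    (i j : Nat) (hij : i < j) (hj : j < l.length) : R (l.getD i 0) (l.getD j 0) := by
  have hi : i < l.length := lt_trans hij hj
  rw [List.getD_eq_getElem l 0 hi, List.getD_eq_getElem l 0 hj]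
  exact List.pairwise_iff_getElem.mp h i j hi hj hij

lemma pv_getD_mono (l : List Int) (h : l.Pairwise (fun a b => a ≤ b)) {i j : Nat}
    (hij : i ≤ j) (hj : j < l.length) : l.getD i 0 ≤ l.getD j 0 := by
  rcases Nat.lt_or_ge i j with hlt | hge
  · exact pv_pairwise_getD l h i j hlt hj
  · have : i = j := by omega
    subst this; rfl

lemma pv_idx_of_mem (l : List Int) (x : Int) (hx : x ∈ l) :
    ∃ j, j < l.length ∧ l.getD j 0 = x := by
  obtain ⟨j, hj, rfl⟩ := List.mem_iff_getElem.mp hx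
  exact ⟨j, hj, List.getD_eq_getElem l 0 hj⟩

lemma pv_idx_of_mem_drop (l : List Int) (n : Nat) (x : Int) (hx : x ∈ l.drop n) :
    ∃ j, n ≤ j ∧ j < l.length ∧ l.getD j 0 = x := by
  obtain ⟨k, hk, hke⟩ := List.mem_iff_getElem.mp hx
  rw [List.getElem_drop] at hke
  have hkl : n + k < l.length := by
    have h1 : (l.drop n).length = l.length - n := List.length_drop
    omega
  exact ⟨n + k, by omega, hkl, by rw [List.getD_eq_getElem l 0 hkl]; exact hke⟩

lemma pv_idx_of_mem_take (l : List Int) (n : Nat) (x : Int) (hx : x ∈ l.take n) :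
    ∃ j, j < n ∧ j < l.length ∧ l.getD j 0 = x := by
  obtain ⟨k, hk, hke⟩ := List.mem_iff_getElem.mp hx
  rw [List.getElem_take] at hke
  have hkn : k < n ∧ k < l.length := by
    have h1 : (l.take n).length = min n l.length := List.length_take
    omega
  exact ⟨k, hkn.1, hkn.2, by rw [List.getD_eq_getElem l 0 hkn.2]; exact hke⟩

lemma pvRest_nil (sweets savories : List Int) (si sj : Nat)
    (h : sweets.drop si = []) : pvRest sweets savories si sj = [] := by
  unfold pvRest; rw [h]

lemma pvRest_cons (sweets savories : List Int) (si sj : Nat) (s : Int) (rest : List Int)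
    (h : sweets.drop si = s :: rest) :
    pvRest sweets savories si sj
      = ((savories.drop sj).map (fun v => (s, v))) ++
          rest.flatMap (fun s' => savories.map (fun v => (s', v))) := by
  unfold pvRest; rw [h]

lemma pv_loopA_eq_fold (sweets savories : List Int) (target : Int)
    (hsw : sweets.Pairwise (fun a b => b ≤ a))
    (hsv : savories.Pairwise (fun a b => a ≤ b))
    (si sj : Nat) (sweet savory : Int) (d : Option Int)
    (hnone : d = none → sweet = 0 ∧ savory = 0)
    (H : ∀ j, j < sj → si < sweets.length →
        sweets.getD si 0 + savories.getD j 0 ≤ target →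
        ∃ dd, d = some dd ∧ dd ≤ target - (sweets.getD si 0 + savories.getD j 0))
    (H2 : 0 < sj → si < sweets.length →
        sweets.getD si 0 + savories.getD (sj - 1) 0 ≤ target)
    (hsjle : sj ≤ savories.length) :
    pvLoopA sweets savories target si sj sweet savory d
      = pvOut ((pvRest sweets savories si sj).foldl (pvPairStep target) (pvAbs sweet savory d)) := by
  by_cases h : si < sweets.length ∧ sj < savories.length
  · obtain ⟨hsi, hsj⟩ := h
    have hdropS : sweets.drop si = sweets.getD si 0 :: sweets.drop (si + 1) := by
      rw [List.getD_eq_getElem sweets 0 hsi]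
      exact List.drop_eq_getElem_cons hsi
    have hdropV : savories.drop sj = savories.getD sj 0 :: savories.drop (sj + 1) := by
      rw [List.getD_eq_getElem savories 0 hsj]
      exact List.drop_eq_getElem_cons hsj
    rw [pvLoopA, dif_pos ⟨hsi, hsj⟩]
    set s0 := sweets.getD si 0 with hs0
    set v0 := savories.getD sj 0 with hv0
    have hrest_cons : pvRest sweets savories si sj
        = (s0, v0) :: pvRest sweets savories si (sj + 1) := by
      rw [pvRest_cons sweets savories si sj _ _ hdropS,
          pvRest_cons sweets savories si (sj+1) _ _ hdropS, hdropV]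
      simp
    by_cases hle : s0 + v0 ≤ target
    · rw [if_pos hle]
      by_cases hcmp : pvCmpInf (target - (s0 + v0)) d = true
      · rw [if_pos hcmp]
        have hstep : pvPairStep target (pvAbs sweet savory d) (s0, v0)
            = pvAbs s0 v0 (some (target - (s0 + v0))) := by
          cases d with
          | none => simp [pvPairStep, pvStepB, pvAbs, hle]
          | some dd =>
            have hlt : target - (s0 + v0) < dd := by
              simpa [pvCmpInf] using hcmp
            simp [pvPairStep, pvStepB, pvAbs, hle, hlt]
        rw [pv_loopA_eq_fold sweets savories target hsw hsv si (sj + 1) s0 v0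
              (some (target - (s0 + v0))) (by intro hx; cases hx)
              ?_ ?_ (by omega), hrest_cons, List.foldl_cons, hstep]
        · intro j hj _ hsum
          refine ⟨target - (s0 + v0), rfl, ?_⟩
          rcases Nat.lt_or_ge j sj with hjlt | hjge
          · obtain ⟨dd, hd, hdd⟩ := H j hjlt hsi hsum
            have hlt : target - (s0 + v0) < dd := by
              subst hd; simpa [pvCmpInf] using hcmp
            omega
          · have hjv : j = sj := by omega
            subst hjv; omega
        · intro _ _
          simpa using hle
      · rw [if_neg hcmp]
        obtain ⟨dd, hd⟩ : ∃ dd, d = some dd := by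
          cases d with
          | none => simp [pvCmpInf] at hcmp
          | some dd => exact ⟨dd, rfl⟩
        have hge : dd ≤ target - (s0 + v0) := by
          subst hd
          simp only [pvCmpInf, decide_eq_true_eq] at hcmp
          omega
        have hstep : pvPairStep target (pvAbs sweet savory d) (s0, v0)
            = pvAbs sweet savory d := by
          apply pv_step_neutral
          intro _
          exact ⟨dd, sweet, savory, by rw [hd]; rfl, hge⟩
        rw [pv_loopA_eq_fold sweets savories target hsw hsv si (sj + 1) sweet savory d
              hnone ?_ ?_ (by omega), hrest_cons, List.foldl_cons, hstep]
        · intro j hj _ hsum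
          rcases Nat.lt_or_ge j sj with hjlt | hjge
          · exact H j hjlt hsi hsum
          · have hjv : j = sj := by omega
            subst hjv
            exact ⟨dd, hd, hge⟩
        · intro _ _
          simpa using hle
    · rw [if_neg hle]
      -- advance sweet: pairs (si, j ≥ sj) never qualify; pairs (si+1, j < sj) are dominated
      have hskipA : ((savories.drop sj).map (fun v => (s0, v))).foldl (pvPairStep target)
          (pvAbs sweet savory d) = pvAbs sweet savory d := by
        apply pv_fold_neutral
        intro p hp hq
        exfalso
        obtain ⟨v, hv, rfl⟩ := List.mem_map.mp hp
        obtain ⟨j, hjge, hjl, hje⟩ := pv_idx_of_mem_drop savories sj v hv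
        have : v0 ≤ v := by
          rw [← hje]
          exact pv_getD_mono savories hsv hjge hjl
        simp only at hq
        omega
      have hfold : (pvRest sweets savories si sj).foldl (pvPairStep target) (pvAbs sweet savory d)
          = (pvRest sweets savories (si + 1) sj).foldl (pvPairStep target) (pvAbs sweet savory d) := by
        cases hrest : sweets.drop (si + 1) with
        | nil =>
          rw [pvRest_cons sweets savories si sj _ _ hdropS, hrest,
              pvRest_nil sweets savories (si+1) sj hrest,
              List.flatMap_nil, List.append_nil, List.foldl_nil]
          exact hskipA
        | cons s1 rest' =>
          have hs1i : sweets.getD (si + 1) 0 = s1 := by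
            have : sweets.drop (si+1) ≠ [] := by rw [hrest]; simp
            have hl : si + 1 < sweets.length := by
              by_contra hc
              exact this (List.drop_eq_nil_of_le (by omega))
            rw [List.getD_eq_getElem sweets 0 hl]
            have := List.drop_eq_getElem_cons hl (l := sweets)
            rw [hrest] at this
            exact (List.cons.injEq _ _ _ _ ▸ this).1.symm
          have hs1le : s1 ≤ s0 := by
            have hl : si + 1 < sweets.length := by
              by_contra hc
              have : sweets.drop (si+1) = [] := List.drop_eq_nil_of_le (by omega)
              rw [hrest] at this; simp at this
            rw [← hs1i]
            exact pv_pairwise_getD sweets hsw si (si+1) (by omega) hl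
          have hsplit : savories.map (fun v => (s1, v))
              = (savories.take sj).map (fun v => (s1, v))
                ++ (savories.drop sj).map (fun v => (s1, v)) := by
            rw [← List.map_append, List.take_append_drop]
          have hskipB : ((savories.take sj).map (fun v => (s1, v))).foldl (pvPairStep target)
              (pvAbs sweet savory d) = pvAbs sweet savory d := by
            apply pv_fold_neutral
            intro p hp hq
            obtain ⟨v, hv, rfl⟩ := List.mem_map.mp hp
            obtain ⟨j, hjlt, hjl, hje⟩ := pv_idx_of_mem_take savories sj v hv
            have hvle : v ≤ savories.getD (sj - 1) 0 := by
              rw [← hje]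
              exact pv_getD_mono savories hsv (by omega) (by omega)
            have hs0v : s0 + v ≤ target := by
              have := H2 (by omega) hsi
              omega
            obtain ⟨dd, hd, hdd⟩ := H j (by omega) hsi (by rw [hje]; exact hs0v)
            refine ⟨dd, sweet, savory, by rw [hd]; rfl, ?_⟩
            simp only at hq ⊢
            rw [hje] at hdd
            omega
          rw [pvRest_cons sweets savories si sj _ _ hdropS, hrest,
              pvRest_cons sweets savories (si+1) sj _ _ hrest,
              List.flatMap_cons, hsplit]
          simp only [← List.append_assoc]
          rw [List.foldl_append, List.foldl_append, List.foldl_append, hskipA, hskipB,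
              ← List.foldl_append]
      rw [hfold]
      apply pv_loopA_eq_fold sweets savories target hsw hsv (si + 1) sj sweet savory d hnone ?_ ?_ hsjle
      · intro j hj hsi1 hsum
        have hs1le : sweets.getD (si+1) 0 ≤ s0 :=
          pv_pairwise_getD sweets hsw si (si+1) (by omega) hsi1
        have hvle : savories.getD j 0 ≤ savories.getD (sj - 1) 0 :=
          pv_getD_mono savories hsv (by omega) (by omega)
        have hs0v : s0 + savories.getD j 0 ≤ target := by
          have := H2 (by omega) hsi
          omega
        obtain ⟨dd, hd, hdd⟩ := H j hj hsi hs0v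
        exact ⟨dd, hd, by omega⟩
      · intro hsj0 hsi1
        have hs1le : sweets.getD (si+1) 0 ≤ s0 :=
          pv_pairwise_getD sweets hsw si (si+1) (by omega) hsi1
        have := H2 hsj0 hsi
        omega
  · rw [pvLoopA, dif_neg h]
    rcases Nat.lt_or_ge si sweets.length with hsi | hsi
    · -- sj = savories.length : savories exhausted
      have hsj : sj = savories.length := by omega
      have hdropS : sweets.drop si = sweets.getD si 0 :: sweets.drop (si + 1) := by
        rw [List.getD_eq_getElem sweets 0 hsi]
        exact List.drop_eq_getElem_cons hsi
      have hdropV : savories.drop sj = [] := List.drop_eq_nil_of_le (by omega)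
      have hneut : ((sweets.drop (si+1)).flatMap
          (fun s' => savories.map (fun v => (s', v)))).foldl (pvPairStep target)
          (pvAbs sweet savory d) = pvAbs sweet savory d := by
        apply pv_fold_neutral
        intro p hp hq
        obtain ⟨s', hs', hp2⟩ := List.mem_flatMap.mp hp
        obtain ⟨v, hv, rfl⟩ := List.mem_map.mp hp2
        obtain ⟨j, hjl, hje⟩ := pv_idx_of_mem savories v hv
        obtain ⟨k, hkge, hkl, hke⟩ := pv_idx_of_mem_drop sweets (si+1) s' hs'
        have hs'le : s' ≤ sweets.getD si 0 := by
          rw [← hke]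
          exact pv_pairwise_getD sweets hsw si k (by omega) hkl
        have hlen0 : 0 < savories.length := by
          rcases savories with _ | _
          · simp at hv
          · simp
        have hvle : v ≤ savories.getD (savories.length - 1) 0 := by
          rw [← hje]
          exact pv_getD_mono savories hsv (by omega) (by omega)
        have hs0v : sweets.getD si 0 + v ≤ target := by
          have h2 := H2 (by omega) hsi
          rw [hsj] at h2
          omega
        obtain ⟨dd, hd, hdd⟩ := H j (by omega) hsi (by rw [hje]; exact hs0v)
        refine ⟨dd, sweet, savory, by rw [hd]; rfl, ?_⟩
        simp only at hq ⊢
        rw [hje] at hdd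
        omega
      rw [pvRest_cons sweets savories si sj _ _ hdropS, hdropV]
      simp only [List.map_nil, List.nil_append]
      rw [hneut]
      cases d with
      | none =>
        obtain ⟨h1, h2⟩ := hnone rfl
        subst h1; subst h2; rfl
      | some dd => rfl
    · -- sweets exhausted
      rw [pvRest_nil sweets savories si sj (List.drop_eq_nil_of_le (by omega))]
      cases d with
      | none =>
        obtain ⟨h1, h2⟩ := hnone rfl
        subst h1; subst h2; rfl
      | some dd => rfl
termination_by (sweets.length - si) + (savories.length - sj)
decreasing_by all_goals omega

lemma pv_fold_flatMap (target : Int) (savories : List Int) :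
    ∀ (sweets : List Int) (b : Option (Int × Int × Int)),
      (sweets.flatMap (fun s => savories.map (fun v => (s, v)))).foldl (pvPairStep target) b
        = sweets.foldl (fun b s => savories.foldl (pvStepB target s) b) b := by
  intro sweets
  induction sweets with
  | nil => intro b; rfl
  | cons s ss ih =>
    intro b
    rw [List.flatMap_cons, List.foldl_append, List.foldl_cons, List.foldl_map]
    exact ih _

-- ===== VERDICT (by name: the statement is the Claim_ definition above) =====
theorem sweetAndSavory_spec : Claim_equal_sweetAndSavory := by
  intro dishes target _
  unfold Spec_sweetAndSavory sweetAndSavory sweetAndSavory_alt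
  set S := PySem.List.sorted (dishes.filter (fun d => d < 0)) (fun d => |d|) false with hS
  set V := PySem.List.sorted (dishes.filter (fun d => d > 0)) (fun d => d) false with hV
  have hsv : V.Pairwise (fun a b => a ≤ b) := by
    have := PySem.List.sorted_pairwise (xs := dishes.filter (fun d => d > 0)) (key := fun d => d)
    simpa [hV] using this
  have hneg : ∀ x ∈ S, x < 0 := by
    intro x hx
    rw [hS, PySem.List.mem_sorted] at hx
    have := List.mem_filter.mp hx
    simpa using this.2
  have hsw : S.Pairwise (fun a b => b ≤ a) := by
    have habs : S.Pairwise (fun a b => |a| ≤ |b|) := by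
      have := PySem.List.sorted_pairwise (xs := dishes.filter (fun d => d < 0)) (key := fun d => |d|)
      simpa [hS] using this
    rw [List.pairwise_iff_getElem] at habs ⊢
    intro i j hi hj hij
    have h1 := habs i j hi hj hij
    have hxi := hneg _ (List.getElem_mem hi)
    have hxj := hneg _ (List.getElem_mem hj)
    rw [abs_of_neg hxi, abs_of_neg hxj] at h1
    omega
  rw [pv_loopA_eq_fold S V target hsw hsv 0 0 0 0 none (fun _ => ⟨rfl, rfl⟩)
        (by intro j hj; omega) (by intro h0; omega) (by omega)]
  have hrest0 : pvRest S V 0 0 = S.flatMap (fun s => V.map (fun v => (s, v))) := by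
    cases hS' : S with
    | nil => rw [pvRest_nil _ _ _ _ (by simp)]; simp
    | cons s rest =>
      rw [pvRest_cons _ _ _ _ s rest (by simp)]
      simp
  rw [show pvAbs 0 0 none = none from rfl, hrest0, pv_fold_flatMap]
  cases hb : S.foldl (fun b sweet => V.foldl (pvStepB target sweet) b) none with
  | none => simp [pvOut, hb]
  | some t =>
    obtain ⟨dd, sv, vv⟩ := t
    simp [pvOut, hb]
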